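-- pv_equiv track=rewrite | github.com/amazon-braket/amazon-braket-default-simulator-python | src/braket/analog_hamiltonian_simulator/rydberg/rydberg_simulator_helpers.py | _find_configuration_index
-- ===== SOURCE A (Python) =====
-- def _find_configuration_index(
--     configuration: str,
-- ) -> int:
--     """Fining the decimal index corresponding to a configuration.
--
--     Args:
--         configuration (str): A configuration of atoms with each site being 'r' or 'g
--
--     Returns:
--         int: Corresponding decimal number. It is the index of the configuration
--         in an array of all configurations sorted in ascending order accroding to their
--         corresponding numerical values.
--     """
--     config_index = 0
--     num_qubit = len(configuration)
--     for idx in range(num_qubit):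
--         if configuration[-1 - idx] == "r":
--             config_index += 2**idx
--     return config_index
-- ===== SOURCE B (Python) =====
-- def _find_configuration_index(
--     configuration: str,
-- ) -> int:
--     # Horner's method: single left-to-right accumulator doubled each step.
--     acc = 0
--     for c in configuration:
--         acc = acc * 2 + (1 if c == "r" else 0)
--     return acc
-- ===== Notes on version B (the rewrite author's own statement) =====
-- stated objective: alternative
-- what changed: Replaces the reverse-indexed sum of independent 2**idx powers with a forward Horner accumulator acc = acc*2 + bit, changing the recurrence and traversal direction.
import Mathlib
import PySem

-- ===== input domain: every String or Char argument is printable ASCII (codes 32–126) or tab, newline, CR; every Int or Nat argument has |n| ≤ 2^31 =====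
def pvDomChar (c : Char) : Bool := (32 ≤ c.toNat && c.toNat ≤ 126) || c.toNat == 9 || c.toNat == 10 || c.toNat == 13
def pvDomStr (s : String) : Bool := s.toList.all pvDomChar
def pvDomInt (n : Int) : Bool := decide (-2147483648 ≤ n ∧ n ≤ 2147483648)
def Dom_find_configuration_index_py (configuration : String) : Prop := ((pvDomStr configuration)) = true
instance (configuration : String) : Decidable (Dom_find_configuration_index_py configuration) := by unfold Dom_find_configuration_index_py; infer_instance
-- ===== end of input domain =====

-- B replaces A's reversed-index sum of 2**idx powers by a forward Horner accumulator (alternative decomposition, same cost).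

-- ===== PORT A =====
def find_configuration_index_py (configuration : String) : Int :=
  let num_qubit : Int := configuration.toList.length
  (PySem.List.pyRange 0 num_qubit 1).foldl
    (fun config_index idx =>
      if PySem.List.pyGet? configuration.toList (-1 - idx) = some 'r' then
        config_index + 2 ^ idx.toNat
      else config_index) 0

-- ===== PORT B =====
def find_configuration_index_py_alt (configuration : String) : Int :=
  configuration.toList.foldl (fun acc c => acc * 2 + (if c = 'r' then 1 else 0)) 0

-- ===== PRECONDITION & SPEC =====
def Spec_find_configuration_index_py (configuration : String) (out : Int) : Prop := out = find_configuration_index_py_alt configuration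
instance (configuration : String) (out : Int) : Decidable (Spec_find_configuration_index_py configuration out) := by unfold Spec_find_configuration_index_py; infer_instance

-- ===== CLAIM (what is proved, stated in full; the proofs are below) =====
def Claim_equal_find_configuration_index_py : Prop := ∀ (configuration : String), Dom_find_configuration_index_py configuration → Spec_find_configuration_index_py configuration (find_configuration_index_py configuration)

-- ===== LEMMAS AND PROOFS =====

-- A's loop as a sum over the range of indices
theorem aval_eq_sum (l : List Char) (a : Int) :
    (PySem.List.pyRange 0 (l.length : Int) 1).foldl
      (fun config_index idx =>
        if PySem.List.pyGet? l (-1 - idx) = some 'r' then config_index + 2 ^ idx.toNat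
        else config_index) a
      = a + ((PySem.List.pyRange 0 (l.length : Int) 1).map
          (fun idx => if PySem.List.pyGet? l (-1 - idx) = some 'r' then (2:Int) ^ idx.toNat else 0)).sum := by
  have := PySem.List.foldl_add
    (l := PySem.List.pyRange 0 (l.length : Int) 1)
    (g := fun idx => if PySem.List.pyGet? l (-1 - idx) = some 'r' then (2:Int) ^ idx.toNat else 0)
    (a := a)
  rw [← this]
  congr 1
  funext acc x
  split_ifs <;> simp

-- negative index into (c :: t) within t's range hits t
theorem pyGet_neg_cons (c : Char) (t : List Char) (idx : Int) (h0 : 0 ≤ idx) (h1 : idx < (t.length : Int)) :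
    PySem.List.pyGet? (c :: t) (-1 - idx) = PySem.List.pyGet? t (-1 - idx) := by
  have hk : (-1 - idx) = -(((idx.toNat + 1 : Nat) : Int)) := by push_cast; omega
  rw [hk,
    PySem.List.pyGet?_neg_natCast (c :: t) (idx.toNat + 1) (by omega) (by simp; omega),
    PySem.List.pyGet?_neg_natCast t (idx.toNat + 1) (by omega) (by omega)]
  have hm : (c :: t).length - (idx.toNat + 1) = (t.length - (idx.toNat + 1)) + 1 := by
    simp; omega
  rw [hm, List.getElem?_cons_succ]

-- sum form of A, recursively on the front character
theorem asum_cons (c : Char) (t : List Char) :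
    ((PySem.List.pyRange 0 (((c :: t).length : Int)) 1).map
      (fun idx => if PySem.List.pyGet? (c :: t) (-1 - idx) = some 'r' then (2:Int) ^ idx.toNat else 0)).sum
    = ((PySem.List.pyRange 0 ((t.length : Int)) 1).map
      (fun idx => if PySem.List.pyGet? t (-1 - idx) = some 'r' then (2:Int) ^ idx.toNat else 0)).sum
      + (if c = 'r' then (2:Int) ^ t.length else 0) := by
  have hlen : (((c :: t).length : Int)) = ((t.length : Int)) + 1 := by simp
  rw [hlen, PySem.List.pyRange_one_succ_right (by positivity)]
  rw [List.map_append, List.sum_append]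
  congr 1
  · apply congrArg
    apply List.map_congr_left
    intro idx hidx
    have hm := (PySem.List.mem_pyRange_one).1 hidx
    rw [pyGet_neg_cons c t idx hm.1 hm.2]
  · simp only [List.map_cons, List.map_nil, List.sum_cons, List.sum_nil, add_zero]
    have h : PySem.List.pyGet? (c :: t) (-1 - (t.length : Int)) = some c := by
      have hk : (-1 - (t.length : Int)) = -(((t.length + 1 : Nat) : Int)) := by push_cast; ring
      rw [hk, PySem.List.pyGet?_neg_natCast (c :: t) (t.length + 1) (by omega) (by simp)]
      simp
    rw [h]
    have ht : ((t.length : Int)).toNat = t.length := by omega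
    rw [ht]
    by_cases hc : c = 'r' <;> simp [hc]

-- Horner fold with general accumulator
theorem horner_acc (l : List Char) (a : Int) :
    l.foldl (fun acc c => acc * 2 + (if c = 'r' then 1 else 0)) a
      = a * 2 ^ l.length + l.foldl (fun acc c => acc * 2 + (if c = 'r' then 1 else 0)) 0 := by
  induction l generalizing a with
  | nil => simp
  | cons c t ih =>
    simp only [List.foldl_cons, List.length_cons]
    rw [ih (a * 2 + (if c = 'r' then 1 else 0)), ih (0 * 2 + (if c = 'r' then 1 else 0))]
    ring

-- main equality on the character list
theorem main_list (l : List Char) :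
    ((PySem.List.pyRange 0 ((l.length : Int)) 1).map
      (fun idx => if PySem.List.pyGet? l (-1 - idx) = some 'r' then (2:Int) ^ idx.toNat else 0)).sum
    = l.foldl (fun acc c => acc * 2 + (if c = 'r' then 1 else 0)) 0 := by
  induction l with
  | nil => simp [PySem.List.pyRange_one_eq_nil]
  | cons c t ih =>
    rw [asum_cons, ih, List.foldl_cons,
      horner_acc t (0 * 2 + (if c = 'r' then 1 else 0))]
    by_cases hc : c = 'r'
    · simp [hc]; ring
    · simp [hc]

-- ===== VERDICT (by name: the statement is the Claim_ definition above) =====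
theorem find_configuration_index_py_spec : Claim_equal_find_configuration_index_py := by
  intro configuration _
  unfold Spec_find_configuration_index_py find_configuration_index_py find_configuration_index_py_alt
  simp only []
  rw [aval_eq_sum, zero_add, main_list]
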